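-- pv_equiv track=rewrite | github.com/emirisuu/Programming | Python/MOOC course/Part10/part10-04_word_game/src/word_game.py | round_winner
-- ===== SOURCE A (Python) =====
-- def round_winner(player1_word: str, player2_word: str):
--     vowels = "aeiuoAEIUO"
--     counter1 = 0
--     counter2 = 0
--     for vowel in vowels:
--         counter1 += player1_word.count(vowel)
--         counter2 += player2_word.count(vowel)
--     if counter1 > counter2:
--         return 1
--     elif counter2 > counter1:
--         return 2
-- ===== SOURCE B (Python) =====
-- def round_winner(player1_word: str, player2_word: str):
--     vowels = set("aeiuoAEIUO")
--     counter1 = sum(1 for ch in player1_word if ch in vowels)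
--     counter2 = sum(1 for ch in player2_word if ch in vowels)
--     if counter1 > counter2:
--         return 1
--     if counter2 > counter1:
--         return 2
--     return None
-- ===== Notes on version B (the rewrite author's own statement) =====
-- stated objective: idiomatic
-- what changed: B makes a single pass over each word's characters testing membership in a vowel set, instead of A's loop over the 10 vowels with a full word scan (str.count) per vowel.
import Mathlib
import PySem

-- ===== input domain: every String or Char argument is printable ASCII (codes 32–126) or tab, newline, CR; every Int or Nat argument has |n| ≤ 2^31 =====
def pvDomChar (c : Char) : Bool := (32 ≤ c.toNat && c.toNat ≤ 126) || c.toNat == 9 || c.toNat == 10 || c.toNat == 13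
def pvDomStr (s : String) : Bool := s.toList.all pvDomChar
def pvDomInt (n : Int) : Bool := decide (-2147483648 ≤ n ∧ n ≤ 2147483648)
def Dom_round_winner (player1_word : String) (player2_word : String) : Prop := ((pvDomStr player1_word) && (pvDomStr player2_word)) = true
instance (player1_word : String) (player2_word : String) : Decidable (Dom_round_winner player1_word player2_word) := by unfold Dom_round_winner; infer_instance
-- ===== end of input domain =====

-- B replaces A's loop over the 10 vowels (one full `str.count` scan of each word per vowel)
-- by a single pass over each word's characters with a vowel-set membership test (idiomatic).

-- ===== PORT A =====
-- for vowel in "aeiuoAEIUO": counter1 += word1.count(vowel); counter2 += word2.count(vowel)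
def round_winner (player1_word : String) (player2_word : String) : Option Int :=
  let vowels := "aeiuoAEIUO"
  let counters := vowels.toList.foldl
    (fun (p : Int × Int) vowel =>
      (p.1 + (PySem.Str.count player1_word (String.singleton vowel) : Int),
       p.2 + (PySem.Str.count player2_word (String.singleton vowel) : Int)))
    (0, 0)
  if counters.1 > counters.2 then some 1
  else if counters.2 > counters.1 then some 2
  else none

-- ===== PORT B =====
-- vowels = set("aeiuoAEIUO")
def pvVowelSet : List Char := PySem.Set.ofList "aeiuoAEIUO".toList

-- sum(1 for ch in word if ch in vowels)
def pvVowelCount (word : String) : Int :=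
  word.toList.foldl (fun acc ch => if pvVowelSet.contains ch then acc + 1 else acc) 0

def round_winner_alt (player1_word : String) (player2_word : String) : Option Int :=
  let counter1 := pvVowelCount player1_word
  let counter2 := pvVowelCount player2_word
  if counter1 > counter2 then some 1
  else if counter2 > counter1 then some 2
  else none

-- ===== PRECONDITION & SPEC =====
def Spec_round_winner (player1_word : String) (player2_word : String) (out : Option Int) : Prop := out = round_winner_alt player1_word player2_word
instance (player1_word : String) (player2_word : String) (out : Option Int) : Decidable (Spec_round_winner player1_word player2_word out) := by unfold Spec_round_winner; infer_instance

-- ===== CLAIM (what is proved, stated in full; the proofs are below) =====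
def Claim_equal_round_winner : Prop := ∀ (player1_word : String) (player2_word : String), Dom_round_winner player1_word player2_word → Spec_round_winner player1_word player2_word (round_winner player1_word player2_word)

-- ===== LEMMAS AND PROOFS =====

-- Python's str.count with a one-character needle counts occurrences of that character.
lemma count_go_single (c : Char) (l : List Char) : ∀ (fuel acc : Nat), l.length ≤ fuel →
    PySem.Chars.count.go [c] fuel l acc = acc + l.count c := by
  induction l with
  | nil =>
    intro fuel acc _
    cases fuel <;> simp [PySem.Chars.count.go]
  | cons h t ih =>
    intro fuel acc hf
    cases fuel with
    | zero => simp at hf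
    | succ n =>
      simp only [List.length_cons, Nat.succ_le_succ_iff] at hf
      by_cases hc : c = h
      · subst hc
        have hp : [c].isPrefixOf (c :: t) = true := by simp [List.isPrefixOf]
        have hd : List.drop [c].length (c :: t) = t := by simp
        simp only [PySem.Chars.count.go, hp, if_true, hd]
        rw [ih _ _ hf, List.count_cons]
        simp
        omega
      · have hp : [c].isPrefixOf (h :: t) = false := by
          simp [List.isPrefixOf]
          exact fun e => hc e
        simp only [PySem.Chars.count.go, hp, Bool.false_eq_true, if_false]
        rw [ih _ _ hf, List.count_cons]
        simp
        exact fun e => hc e.symm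

lemma str_count_singleton (s : String) (c : Char) :
    PySem.Str.count s (String.singleton c) = s.toList.count c := by
  have h : (String.singleton c).toList = [c] := by simp [String.singleton]
  rw [PySem.Str.count_eq, h]
  show PySem.Chars.count s.toList [c] = _
  unfold PySem.Chars.count
  rw [count_go_single c s.toList _ 0 le_rfl]
  simp

-- Summing `if h == v then 1 else 0` over a duplicate-free list V is a membership test.
lemma sum_ite_eq_contains (h : Char) : ∀ (V : List Char), V.Nodup →
    (V.map (fun v => if h == v then 1 else 0)).sum = (if V.contains h then 1 else 0 : Nat) := by
  intro V
  induction V with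
  | nil => simp
  | cons v V' ih =>
    intro hnd
    rcases List.nodup_cons.mp hnd with ⟨hv, hnd'⟩
    simp only [List.map_cons, List.sum_cons, ih hnd']
    by_cases hc : h = v
    · subst hc
      simp [hv]
    · have hb : (h == v) = false := by simp [hc]
      simp [hb, hc]

-- Σ_{v ∈ V} count of v in w = number of characters of w lying in V, for duplicate-free V.
lemma sum_counts_eq_countP (V : List Char) (hV : V.Nodup) (w : List Char) :
    (V.map (fun v => w.count v)).sum = w.countP (fun c => V.contains c) := by
  induction w with
  | nil => simp
  | cons h t ih =>
    simp only [List.count_cons, List.countP_cons]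
    rw [List.sum_map_add, ih, sum_ite_eq_contains h V hV]

-- A's per-word total over the literal vowel string equals B's single-pass count.
lemma aCount (w : String) :
    (("aeiuoAEIUO".toList.map (fun v => w.toList.count v)).sum : Int) = pvVowelCount w := by
  have h2 : pvVowelSet = "aeiuoAEIUO".toList := by decide
  have hnd : ("aeiuoAEIUO".toList).Nodup := by decide
  rw [sum_counts_eq_countP _ hnd]
  unfold pvVowelCount
  rw [PySem.List.foldl_if_add_one, h2, zero_add]

-- A's pair-fold, componentwise.
lemma foldl_pair (w1 w2 : String) (l : List Char) : ∀ (a b : Int),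
    l.foldl (fun (p : Int × Int) vowel =>
      (p.1 + (PySem.Str.count w1 (String.singleton vowel) : Int),
       p.2 + (PySem.Str.count w2 (String.singleton vowel) : Int))) (a, b)
    = (a + (l.map (fun v => w1.toList.count v)).sum, b + (l.map (fun v => w2.toList.count v)).sum) := by
  induction l with
  | nil => intro a b; simp
  | cons v t ih =>
    intro a b
    rw [List.foldl_cons, ih]
    simp only [List.map_cons, List.sum_cons, str_count_singleton, Prod.mk.injEq]
    constructor <;> push_cast <;> ring

-- ===== VERDICT (by name: the statement is the Claim_ definition above) =====
theorem round_winner_spec : Claim_equal_round_winner := by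
  intro w1 w2 _
  unfold Spec_round_winner round_winner round_winner_alt
  dsimp only
  rw [foldl_pair]
  dsimp only
  rw [zero_add, zero_add, aCount, aCount]
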